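-- pv_equiv track=rewrite | github.com/troller172/MDCP | notebook/paper_figures/plot_linear.py | _ordered_methods
-- ===== SOURCE A (Python) =====
-- from typing import Dict, Iterable, List, Optional, Tuple
--
-- METHOD_BASELINE_MAX = "baseline_max"
--
-- METHOD_BASELINE_SOURCE_PREFIX = "baseline_source_"
--
-- METHOD_MDCP_NONPEN = "mdcp_nonpen"
--
-- METHOD_MDCP_MIMIC = "mdcp_mimic_selected"
--
-- def _ordered_methods(methods: Iterable[str]) -> List[str]:
--     methods_set = set(methods)
--     ordered: List[str] = []
--     if METHOD_BASELINE_MAX in methods_set: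
--         ordered.append(METHOD_BASELINE_MAX)
--     source_methods = sorted(
--         (m for m in methods_set if m.startswith(METHOD_BASELINE_SOURCE_PREFIX)),
--         key=lambda name: int(name.replace(METHOD_BASELINE_SOURCE_PREFIX, "")) if name.replace(METHOD_BASELINE_SOURCE_PREFIX, "").isdigit() else 0,
--     )
--     ordered.extend(source_methods)
--     if METHOD_MDCP_NONPEN in methods_set:
--         ordered.append(METHOD_MDCP_NONPEN)
--     if METHOD_MDCP_MIMIC in methods_set:
--         ordered.append(METHOD_MDCP_MIMIC)
--     return ordered
-- ===== SOURCE B (Python) =====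
-- from typing import Iterable, List, Optional
--
-- METHOD_BASELINE_MAX = "baseline_max"
-- METHOD_BASELINE_SOURCE_PREFIX = "baseline_source_"
-- METHOD_MDCP_NONPEN = "mdcp_nonpen"
-- METHOD_MDCP_MIMIC = "mdcp_mimic_selected"
--
--
-- def _ordered_methods(methods: Iterable[str]) -> List[str]:
--     def _category(name: str) -> Optional[int]:
--         if name == METHOD_BASELINE_MAX:
--             return 0
--         if name.startswith(METHOD_BASELINE_SOURCE_PREFIX):
--             return 1
--         if name == METHOD_MDCP_NONPEN:
--             return 2
--         if name == METHOD_MDCP_MIMIC: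
--             return 3
--         return None
--
--     def _number(name: str) -> int:
--         s = name.replace(METHOD_BASELINE_SOURCE_PREFIX, "")
--         return int(s) if s.isdigit() else 0
--
--     known = [m for m in dict.fromkeys(methods) if _category(m) is not None]
--     return sorted(known, key=lambda m: (_category(m), _number(m)))
-- ===== Notes on version B (the rewrite author's own statement) =====
-- stated objective: idiomatic
-- what changed: Replaces A's staged construction (membership checks appending fixed names around a separately sorted source block) by one keyed stable sort of the deduplicated known methods under a (category, number) priority key.
import Mathlib
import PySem

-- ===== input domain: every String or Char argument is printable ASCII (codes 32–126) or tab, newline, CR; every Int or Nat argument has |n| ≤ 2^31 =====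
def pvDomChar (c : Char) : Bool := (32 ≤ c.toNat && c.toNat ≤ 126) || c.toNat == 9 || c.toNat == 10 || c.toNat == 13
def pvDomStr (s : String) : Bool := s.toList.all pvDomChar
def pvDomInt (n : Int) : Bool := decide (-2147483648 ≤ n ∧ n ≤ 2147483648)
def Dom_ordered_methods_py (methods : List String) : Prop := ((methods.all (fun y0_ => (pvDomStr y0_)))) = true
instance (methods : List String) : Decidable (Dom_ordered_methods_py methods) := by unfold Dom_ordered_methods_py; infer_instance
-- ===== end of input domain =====

-- B replaces A's staged appends around a partial sort by one keyed stable sort of the deduplicated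
-- known methods under a (category, number) priority key (idiomatic; same asymptotic cost).


-- ===== PORT A =====
-- A's sort key lambda: int(name.replace(PREFIX, "")) if …isdigit() else 0 (the isdigit guard makes ofStr? succeed)
def pvSrcKey (name : String) : Int :=
  let r := PySem.Str.replace name "baseline_source_" ""
  if PySem.Str.strIsdigit r then (PySem.Int.ofStr? r).getD 0 else 0

def ordered_methods_py (methods : List String) : List String :=
  let methodsSet : PySem.Set String := PySem.Set.ofList methods
  let ordered : List String :=
    if PySem.Set.contains methodsSet "baseline_max" then ["baseline_max"] else []
  let sourceMethods :=
    PySem.List.sorted (methodsSet.filter (fun m => PySem.Str.startswith m "baseline_source_")) pvSrcKey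
  let ordered := ordered ++ sourceMethods
  let ordered := if PySem.Set.contains methodsSet "mdcp_nonpen" then ordered ++ ["mdcp_nonpen"] else ordered
  let ordered := if PySem.Set.contains methodsSet "mdcp_mimic_selected" then ordered ++ ["mdcp_mimic_selected"] else ordered
  ordered

-- ===== PORT B =====
def pvCategory? (name : String) : Option Int :=
  if name = "baseline_max" then some 0
  else if PySem.Str.startswith name "baseline_source_" then some 1
  else if name = "mdcp_nonpen" then some 2
  else if name = "mdcp_mimic_selected" then some 3
  else none

def pvNumber (name : String) : Int :=
  let s := PySem.Str.replace name "baseline_source_" ""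
  if PySem.Str.strIsdigit s then (PySem.Int.ofStr? s).getD 0 else 0

def ordered_methods_py_alt (methods : List String) : List String :=
  let known := (PySem.List.dedup methods).filter (fun m => (pvCategory? m).isSome)
  -- sorted(known, key=lambda m: (_category(m), _number(m))); on known, _category is the some-value (getD 0)
  PySem.List.sorted2 known (fun m => (pvCategory? m).getD 0) pvNumber

-- ===== PRECONDITION & SPEC =====
-- Pre_ excludes lists containing two distinct "baseline_source_"-prefixed methods with EQUAL sort keys:
-- there A's output order among them is an accident of Python's set-iteration (hash) order.
def Pre_ordered_methods_py (methods : List String) : Prop :=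
  ((PySem.Set.ofList methods).filter (fun m => PySem.Str.startswith m "baseline_source_")).Pairwise
    (fun a b => pvSrcKey a ≠ pvSrcKey b)
instance (methods : List String) : Decidable (Pre_ordered_methods_py methods) := by
  unfold Pre_ordered_methods_py; infer_instance

def pvWitness_ordered_methods_py : List String :=
  ["mdcp_nonpen", "baseline_source_2", "foo", "baseline_max", "baseline_source_1", "baseline_source_2"]

def Spec_ordered_methods_py (methods : List String) (out : List String) : Prop := out = ordered_methods_py_alt methods
instance (methods : List String) (out : List String) : Decidable (Spec_ordered_methods_py methods out) := by unfold Spec_ordered_methods_py; infer_instance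

-- ===== CLAIM (what is proved, stated in full; the proofs are below) =====
def Claim_equal_ordered_methods_py : Prop := ∀ (methods : List String), Dom_ordered_methods_py methods → Pre_ordered_methods_py methods → Spec_ordered_methods_py methods (ordered_methods_py methods)

-- ===== LEMMAS AND PROOFS =====

-- the strict lexicographic priority order B sorts by
def pvSlt (a b : String) : Prop :=
  (pvCategory? a).getD 0 < (pvCategory? b).getD 0 ∨
    ((pvCategory? a).getD 0 = (pvCategory? b).getD 0 ∧ pvNumber a < pvNumber b)

-- sorted2's boolean comparator decides pvSlt
theorem pvLtb_iff (a b : String) :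
    (decide ((pvCategory? a).getD 0 < (pvCategory? b).getD 0) ||
      (!decide ((pvCategory? b).getD 0 < (pvCategory? a).getD 0) && decide (pvNumber a < pvNumber b))) = true
      ↔ pvSlt a b := by
  unfold pvSlt
  by_cases h1 : (pvCategory? a).getD 0 < (pvCategory? b).getD 0 <;>
    by_cases h2 : (pvCategory? b).getD 0 < (pvCategory? a).getD 0 <;>
      simp [h1, h2] <;> omega

-- a strictly increasing arrangement is unique among weakly increasing permutations
theorem pv_unique {α : Type} (slt : α → α → Prop) :
    ∀ (ys zs : List α), ys.Perm zs → ys.Pairwise slt →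
      zs.Pairwise (fun a b => ¬ slt b a) → ys = zs := by
  intro ys
  induction ys with
  | nil => intro zs hp _ _; exact (hp.nil_eq).symm ▸ rfl
  | cons a ys ih =>
    intro zs hp hys hzs
    cases zs with
    | nil => exact absurd hp.symm (by simp)
    | cons b zs =>
      by_cases hab : a = b
      · subst hab
        exact congrArg (a :: ·) (ih zs (hp.cons_inv) hys.of_cons hzs.of_cons)
      · exfalso
        have ha : a ∈ b :: zs := hp.mem_iff.mp (List.mem_cons_self ..)
        have ha' : a ∈ zs := by
          cases ha with
          | head => exact absurd rfl hab
          | tail _ h => exact h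
        have hb : b ∈ a :: ys := hp.symm.mem_iff.mp (List.mem_cons_self ..)
        have hb' : b ∈ ys := by
          cases hb with
          | head => exact absurd rfl (fun h => hab h.symm)
          | tail _ h => exact h
        exact (List.rel_of_pairwise_cons hzs ha') (List.rel_of_pairwise_cons hys hb')

theorem pvSlt_trans (a b c : String) : pvSlt a b → pvSlt b c → pvSlt a c := by
  unfold pvSlt; omega

-- insertion keeps the list weakly increasing
theorem pv_insert_pairwise (ltb : String → String → Bool)
    (hiff : ∀ a b, ltb a b = true ↔ pvSlt a b)
    (x : String) (l : List String)
    (hl : l.Pairwise (fun a b => ¬ pvSlt b a)) :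
    (PySem.List.insertBy ltb x l).Pairwise (fun a b => ¬ pvSlt b a) := by
  induction l with
  | nil => simp [PySem.List.insertBy]
  | cons y ys ih =>
    by_cases hxy : ltb x y = true
    · rw [show PySem.List.insertBy ltb x (y :: ys) = x :: y :: ys from by
        simp [PySem.List.insertBy, hxy]]
      refine List.Pairwise.cons ?_ hl
      intro z hz hzx
      have hxyp : pvSlt x y := (hiff x y).mp hxy
      cases hz with
      | head => exact absurd (pvSlt_trans _ _ _ hzx hxyp) (by unfold pvSlt; omega)
      | tail _ hzys =>
        exact (List.rel_of_pairwise_cons hl hzys) (pvSlt_trans _ _ _ hzx hxyp)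
    · rw [show PySem.List.insertBy ltb x (y :: ys) = y :: PySem.List.insertBy ltb x ys from by
        simp [PySem.List.insertBy, hxy]]
      refine List.Pairwise.cons ?_ (ih hl.of_cons)
      intro z hz
      rcases (PySem.List.mem_insertBy _ _ _ _).mp hz with h | h
      · subst h; exact fun hzy => hxy ((hiff z y).mpr hzy)
      · exact List.rel_of_pairwise_cons hl h

-- B's sort is weakly increasing under pvSlt
theorem pv_sorted2_pairwise (xs : List String) :
    (PySem.List.sorted2 xs (fun m => (pvCategory? m).getD 0) pvNumber).Pairwise
      (fun a b => ¬ pvSlt b a) := by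
  show (xs.foldl (fun acc x => PySem.List.insertBy _ x acc) []).Pairwise _
  have h : ∀ (l : List String) (acc : List String),
      acc.Pairwise (fun a b => ¬ pvSlt b a) →
      (l.foldl (fun acc x => PySem.List.insertBy
        (fun a b => decide ((pvCategory? a).getD 0 < (pvCategory? b).getD 0) ||
          (!decide ((pvCategory? b).getD 0 < (pvCategory? a).getD 0) && decide (pvNumber a < pvNumber b)))
        x acc) acc).Pairwise (fun a b => ¬ pvSlt b a) := by
    intro l
    induction l with
    | nil => intro acc h; exact h
    | cons x l ih =>
      intro acc h
      exact ih _ (pv_insert_pairwise _ pvLtb_iff x acc h)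
  exact h xs [] List.Pairwise.nil


theorem pv_contains_iff (u : List String) (y : String) :
    PySem.Set.contains u y = true ↔ y ∈ u := by
  simp [PySem.Set.contains]

theorem pvCat_of_src (m : String) (h : PySem.Str.startswith m "baseline_source_" = true) :
    pvCategory? m = some 1 := by
  unfold pvCategory?
  by_cases hm : m = "baseline_max"
  · subst hm; exact absurd h (by decide)
  · rw [if_neg hm, if_pos h]

theorem pvCat_isSome_iff (m : String) :
    (pvCategory? m).isSome = true ↔
      (m = "baseline_max" ∨ PySem.Str.startswith m "baseline_source_" = true ∨
        m = "mdcp_nonpen" ∨ m = "mdcp_mimic_selected") := by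
  unfold pvCategory?
  split_ifs <;> simp_all

theorem pvSlt_irrefl (a : String) : ¬ pvSlt a a := by unfold pvSlt; omega

theorem pv_blocks_pairwise (S : List String) (hS : S.Pairwise pvSlt)
    (hScat : ∀ m ∈ S, pvCategory? m = some 1) (b0 b2 b3 : Bool) :
    ((if b0 then ["baseline_max"] else []) ++
      (S ++ ((if b2 then ["mdcp_nonpen"] else []) ++
        (if b3 then ["mdcp_mimic_selected"] else [])))).Pairwise pvSlt := by
  have h01 : ∀ m ∈ S, pvSlt "baseline_max" m := by
    intro m hm; unfold pvSlt; rw [hScat m hm]; left; decide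
  have h12 : ∀ m ∈ S, pvSlt m "mdcp_nonpen" := by
    intro m hm; unfold pvSlt; rw [hScat m hm]; left; decide
  have h13 : ∀ m ∈ S, pvSlt m "mdcp_mimic_selected" := by
    intro m hm; unfold pvSlt; rw [hScat m hm]; left; decide
  have h02 : pvSlt "baseline_max" "mdcp_nonpen" := by unfold pvSlt; left; decide
  have h03 : pvSlt "baseline_max" "mdcp_mimic_selected" := by unfold pvSlt; left; decide
  have h23 : pvSlt "mdcp_nonpen" "mdcp_mimic_selected" := by unfold pvSlt; left; decide
  have pw_if : ∀ (b : Bool) (s : String), (if b then [s] else ([] : List String)).Pairwise pvSlt := by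
    intro b s; cases b <;> simp
  have mem_if : ∀ (b : Bool) (s x : String), x ∈ (if b then [s] else ([] : List String)) → x = s := by
    intro b s x; cases b <;> simp
  refine List.pairwise_append.mpr ⟨pw_if _ _, List.pairwise_append.mpr
    ⟨hS, List.pairwise_append.mpr ⟨pw_if _ _, pw_if _ _, ?_⟩, ?_⟩, ?_⟩
  · intro a ha b hb
    rw [mem_if _ _ _ ha, mem_if _ _ _ hb]; exact h23
  · intro a ha b hb
    rcases List.mem_append.mp hb with hb | hb
    · rw [mem_if _ _ _ hb]; exact h12 a ha
    · rw [mem_if _ _ _ hb]; exact h13 a ha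
  · intro a ha b hb
    rw [mem_if _ _ _ ha]
    rcases List.mem_append.mp hb with hb | hb
    · exact h01 b hb
    · rcases List.mem_append.mp hb with hb | hb
      · rw [mem_if _ _ _ hb]; exact h02
      · rw [mem_if _ _ _ hb]; exact h03

theorem pv_main (methods : List String) (hpre : Pre_ordered_methods_py methods) :
    ordered_methods_py methods = ordered_methods_py_alt methods := by
  unfold Pre_ordered_methods_py at hpre
  have hA : ordered_methods_py methods =
      (if PySem.Set.contains (PySem.Set.ofList methods) "baseline_max" then ["baseline_max"] else []) ++
        (PySem.List.sorted ((PySem.Set.ofList methods).filter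
            (fun m => PySem.Str.startswith m "baseline_source_")) pvSrcKey ++
          ((if PySem.Set.contains (PySem.Set.ofList methods) "mdcp_nonpen" then ["mdcp_nonpen"] else []) ++
            (if PySem.Set.contains (PySem.Set.ofList methods) "mdcp_mimic_selected" then ["mdcp_mimic_selected"] else []))) := by
    by_cases h0 : PySem.Set.contains (PySem.Set.ofList methods) "baseline_max" = true <;>
      by_cases h2 : PySem.Set.contains (PySem.Set.ofList methods) "mdcp_nonpen" = true <;>
        by_cases h3 : PySem.Set.contains (PySem.Set.ofList methods) "mdcp_mimic_selected" = true <;>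
          simp only [ordered_methods_py, h0, h2, h3, if_true, if_false, Bool.false_eq_true,
            List.append_assoc, List.nil_append, List.append_nil]
  have hAlt : ordered_methods_py_alt methods =
      PySem.List.sorted2 ((PySem.Set.ofList methods).filter (fun m => (pvCategory? m).isSome))
        (fun m => (pvCategory? m).getD 0) pvNumber := by
    unfold ordered_methods_py_alt
    rw [PySem.List.dedup_eq_ofList]
  rw [hA, hAlt]
  -- abbreviations
  have hScat : ∀ m ∈ PySem.List.sorted ((PySem.Set.ofList methods).filter
      (fun m => PySem.Str.startswith m "baseline_source_")) pvSrcKey, pvCategory? m = some 1 := by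
    intro m hm
    rw [PySem.List.mem_sorted] at hm
    exact pvCat_of_src m (List.mem_filter.mp hm).2
  have hSne : (PySem.List.sorted ((PySem.Set.ofList methods).filter
      (fun m => PySem.Str.startswith m "baseline_source_")) pvSrcKey).Pairwise
      (fun a b => pvSrcKey a ≠ pvSrcKey b) := by
    exact (List.Perm.pairwise_iff (fun h => h.symm)
      (PySem.List.sorted_perm _ _ _)).mpr hpre
  have hSpw : (PySem.List.sorted ((PySem.Set.ofList methods).filter
      (fun m => PySem.Str.startswith m "baseline_source_")) pvSrcKey).Pairwise pvSlt := by
    refine ((PySem.List.sorted_pairwise _ _).and hSne).imp_of_mem ?_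
    intro a b ha hb hab
    right
    refine ⟨by rw [hScat a ha, hScat b hb], ?_⟩
    show pvSrcKey a < pvSrcKey b
    exact lt_of_le_of_ne hab.1 hab.2
  have hOpw := pv_blocks_pairwise _ hSpw hScat
    (PySem.Set.contains (PySem.Set.ofList methods) "baseline_max")
    (PySem.Set.contains (PySem.Set.ofList methods) "mdcp_nonpen")
    (PySem.Set.contains (PySem.Set.ofList methods) "mdcp_mimic_selected")
  have hknodup : ((PySem.Set.ofList methods).filter (fun m => (pvCategory? m).isSome)).Nodup :=
    (PySem.Set.nodup_ofList methods).filter _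
  have hmem : ∀ x, x ∈ (if PySem.Set.contains (PySem.Set.ofList methods) "baseline_max" then ["baseline_max"] else []) ++
        (PySem.List.sorted ((PySem.Set.ofList methods).filter
            (fun m => PySem.Str.startswith m "baseline_source_")) pvSrcKey ++
          ((if PySem.Set.contains (PySem.Set.ofList methods) "mdcp_nonpen" then ["mdcp_nonpen"] else []) ++
            (if PySem.Set.contains (PySem.Set.ofList methods) "mdcp_mimic_selected" then ["mdcp_mimic_selected"] else []))) ↔
      x ∈ (PySem.Set.ofList methods).filter (fun m => (pvCategory? m).isSome) := by
    intro x
    rw [List.mem_filter]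
    simp only [List.mem_append, PySem.List.mem_sorted, List.mem_filter,
      pvCat_isSome_iff, pv_contains_iff, List.mem_ite_nil_right, List.mem_singleton]
    constructor
    · rintro (⟨hm, rfl⟩ | ⟨hx, hs⟩ | ⟨hm, rfl⟩ | ⟨hm, rfl⟩)
      · exact ⟨hm, Or.inl rfl⟩
      · exact ⟨hx, Or.inr (Or.inl hs)⟩
      · exact ⟨hm, Or.inr (Or.inr (Or.inl rfl))⟩
      · exact ⟨hm, Or.inr (Or.inr (Or.inr rfl))⟩
    · rintro ⟨hx, (rfl | hs | rfl | rfl)⟩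
      · exact Or.inl ⟨hx, rfl⟩
      · exact Or.inr (Or.inl ⟨hx, hs⟩)
      · exact Or.inr (Or.inr (Or.inl ⟨hx, rfl⟩))
      · exact Or.inr (Or.inr (Or.inr ⟨hx, rfl⟩))
  have hperm : ((if PySem.Set.contains (PySem.Set.ofList methods) "baseline_max" then ["baseline_max"] else []) ++
        (PySem.List.sorted ((PySem.Set.ofList methods).filter
            (fun m => PySem.Str.startswith m "baseline_source_")) pvSrcKey ++
          ((if PySem.Set.contains (PySem.Set.ofList methods) "mdcp_nonpen" then ["mdcp_nonpen"] else []) ++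
            (if PySem.Set.contains (PySem.Set.ofList methods) "mdcp_mimic_selected" then ["mdcp_mimic_selected"] else [])))).Perm
      (PySem.List.sorted2 ((PySem.Set.ofList methods).filter (fun m => (pvCategory? m).isSome))
        (fun m => (pvCategory? m).getD 0) pvNumber) :=
    ((List.perm_ext_iff_of_nodup
        (hOpw.imp (fun {a b} (h : pvSlt a b) (hab : a = b) => pvSlt_irrefl b (hab ▸ h))) hknodup).mpr hmem).trans
      (PySem.List.sorted2_perm _ _ _ _).symm
  exact pv_unique pvSlt _ _ hperm hOpw (pv_sorted2_pairwise _)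

-- ===== VERDICT (by name: the statement is the Claim_ definition above) =====
theorem ordered_methods_py_spec : Claim_equal_ordered_methods_py := by
  intro methods _ hpre
  unfold Spec_ordered_methods_py
  exact pv_main methods hpre
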